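-- pv_equiv track=rewrite | github.com/AliceInWonderland61/spring2025-python | Week3/week-3-S1-P1.py | clean_post
-- ===== SOURCE A (Python) =====
-- def clean_post(post):
--     stack=[]
--     #let's account for empyt string which is also considered clean
--     if len(post)==0:
--         return ""
--
--     for i in post:
--         if len(stack)==0:
--             stack.append(i)
--         else:
--             if stack[-1].lower()==i.lower() and stack[-1].isupper()!=i.isupper():
--                 stack.pop()
--             else:
--                 stack.append(i)
--
--     return "".join(stack)
-- ===== SOURCE B (Python) =====
-- def clean_post(post):
--     # Fixpoint elimination: repeatedly delete the FIRST adjacent pair of the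
--     # same letter in opposite cases, restarting the scan, until none remains.
--     s = list(post)
--     while True:
--         i = 0
--         found = False
--         while i + 1 < len(s):
--             a, b = s[i], s[i + 1]
--             if a.lower() == b.lower() and a.isupper() != b.isupper():
--                 del s[i:i + 2]
--                 found = True
--                 break
--             i += 1
--         if not found:
--             return "".join(s)
-- ===== Notes on version B (the rewrite author's own statement) =====
-- stated objective: alternative
-- what changed: Replaces the single left-to-right stack pass by a fixpoint elimination that repeatedly finds and deletes the first adjacent opposite-case same-letter pair until no such pair remains (equal by confluence of the cancellation rewrite).
import Mathlib
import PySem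

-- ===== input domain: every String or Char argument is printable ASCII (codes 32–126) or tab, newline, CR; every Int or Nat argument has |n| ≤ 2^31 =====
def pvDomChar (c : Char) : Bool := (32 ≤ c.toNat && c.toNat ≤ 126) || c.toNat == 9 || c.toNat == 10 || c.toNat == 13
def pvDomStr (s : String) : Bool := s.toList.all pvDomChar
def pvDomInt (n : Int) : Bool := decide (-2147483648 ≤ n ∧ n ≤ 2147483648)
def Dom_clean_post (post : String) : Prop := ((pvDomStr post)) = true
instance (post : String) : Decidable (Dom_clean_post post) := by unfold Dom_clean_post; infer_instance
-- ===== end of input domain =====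

-- B replaces A's one stack pass by a fixpoint loop deleting the first adjacent
-- opposite-case same-letter pair until none remains (alternative algorithm, not faster).

-- shared cancellation test: x.lower() == y.lower() and x.isupper() != y.isupper()
def pvCancel (a b : Char) : Bool :=
  (PySem.Chars.lowerChar a == PySem.Chars.lowerChar b)
    && (PySem.Chars.isupper a != PySem.Chars.isupper b)

-- ===== PORT A =====
-- loop body of `for i in post`: stack kept with its top at the END, as in Python
def cleanStep (stack : List Char) (i : Char) : List Char :=
  if stack.length = 0 then stack ++ [i]
  else if pvCancel (stack.getLastD ' ') i then stack.dropLast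
  else stack ++ [i]

def clean_post (post : String) : String :=
  if post.toList.length = 0 then ""
  else String.mk (post.toList.foldl cleanStep [])

-- ===== PORT B =====
-- inner `while i + 1 < len(s)` scan: index of the first cancelable adjacent pair
def findCancel : List Char → Option Nat
  | a :: b :: rest => if pvCancel a b then some 0 else (findCancel (b :: rest)).map (· + 1)
  | _ => none

theorem findCancel_lt : ∀ {s : List Char} {i : Nat}, findCancel s = some i → i + 1 < s.length := by
  intro s
  induction s with
  | nil => intro i h; simp [findCancel] at h
  | cons a t ih =>
    intro i h
    match t with
    | [] => simp [findCancel] at h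
    | b :: rest =>
      by_cases hc : pvCancel a b = true
      · simp [findCancel, hc] at h
        subst h
        simp only [List.length_cons]
        omega
      · simp [findCancel, hc] at h
        obtain ⟨j, hj, rfl⟩ := h
        have := ih hj
        simp at this ⊢
        omega

-- outer `while True`: delete the found pair and rescan; stop at the fixpoint
def reduceB (s : List Char) : List Char :=
  match h : findCancel s with
  | some i => reduceB (s.take i ++ s.drop (i + 2))
  | none => s
termination_by s.length
decreasing_by
  have := findCancel_lt h
  simp [List.length_take, List.length_drop]
  omega

def clean_post_alt (post : String) : String :=
  String.mk (reduceB post.toList)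

-- ===== PRECONDITION & SPEC =====
def Spec_clean_post (post : String) (out : String) : Prop := out = clean_post_alt post
instance (post : String) (out : String) : Decidable (Spec_clean_post post out) := by unfold Spec_clean_post; infer_instance

-- ===== CLAIM (what is proved, stated in full; the proofs are below) =====
def Claim_equal_clean_post : Prop := ∀ (post : String), Dom_clean_post post → Spec_clean_post post (clean_post post)

-- ===== LEMMAS AND PROOFS =====

-- abstract model of A's pass: stack with its top at the HEAD
def run : List Char → List Char → List Char
  | st, [] => st
  | [], c :: cs => run [c] cs
  | t :: st', c :: cs => if pvCancel t c then run st' cs else run (c :: t :: st') cs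

theorem pvCancel_iff (a b : Char) :
    pvCancel a b = true ↔
      PySem.Chars.lowerChar a = PySem.Chars.lowerChar b ∧
      PySem.Chars.isupper a ≠ PySem.Chars.isupper b := by
  simp [pvCancel]

theorem pvCancel_symm (a b : Char) : pvCancel a b = pvCancel b a := by
  have key : ∀ x y : Char, pvCancel x y = true → pvCancel y x = true := by
    intro x y h
    rw [pvCancel_iff] at h ⊢
    exact ⟨h.1.symm, fun e => h.2 e.symm⟩
  cases hab : pvCancel a b <;> cases hba : pvCancel b a <;> try rfl
  · exact absurd (key b a hba) (by simp [hab])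
  · exact absurd (key a b hab) (by simp [hba])

theorem isupper_bounds {a : Char} (h : PySem.Chars.isupper a = true) :
    65 ≤ a.toNat ∧ a.toNat ≤ 90 := by
  simp only [PySem.Chars.isupper, Bool.and_eq_true, decide_eq_true_eq] at h
  obtain ⟨h1, h2⟩ := h
  rw [Char.le_def] at h1 h2
  have g1 : (65 : Nat) ≤ a.toNat := by simpa using UInt32.le_iff_toNat_le.mp h1
  have g2 : a.toNat ≤ (90 : Nat) := by simpa using UInt32.le_iff_toNat_le.mp h2
  exact ⟨g1, g2⟩

theorem lowerChar_inj {a b : Char} (ha : PySem.Chars.isupper a = PySem.Chars.isupper b)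
    (hl : PySem.Chars.lowerChar a = PySem.Chars.lowerChar b) : a = b := by
  cases hu : PySem.Chars.isupper a with
  | false =>
    have hb : PySem.Chars.isupper b = false := ha ▸ hu
    simpa [PySem.Chars.lowerChar, hu, hb] using hl
  | true =>
    have hb : PySem.Chars.isupper b = true := ha ▸ hu
    have bdA := isupper_bounds hu
    have bdB := isupper_bounds hb
    simp only [PySem.Chars.lowerChar, hu, hb, if_true] at hl
    have hva : a.toNat + 32 < 55296 := by omega
    have hvb : b.toNat + 32 < 55296 := by omega
    have va : (Char.ofNat (a.toNat + 32)).toNat = a.toNat + 32 := by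
      simp [Char.ofNat, Char.ofNatAux, Nat.isValidChar, hva]
      omega
    have vb : (Char.ofNat (b.toNat + 32)).toNat = b.toNat + 32 := by
      simp [Char.ofNat, Char.ofNatAux, Nat.isValidChar, hvb]
      omega
    have : a.toNat = b.toNat := by
      have := congrArg Char.toNat hl
      rw [va, vb] at this
      omega
    exact Char.ext (UInt32.toNat_inj.mp this)

-- two successive cancellations pin the outer characters to be equal
theorem cancel_opp {t a b : Char} (h1 : pvCancel t a = true) (h2 : pvCancel a b = true) :
    t = b := by
  rw [pvCancel_iff] at h1 h2
  apply lowerChar_inj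
  · cases hta : PySem.Chars.isupper t <;> cases hab : PySem.Chars.isupper a <;>
      cases hbb : PySem.Chars.isupper b <;> simp_all
  · exact h1.1.trans h2.1

def Irred (l : List Char) : Prop := List.IsChain (fun x y => pvCancel x y = false) l

theorem run_append (u : List Char) : ∀ (st v : List Char), run st (u ++ v) = run (run st u) v := by
  induction u with
  | nil => intro st v; simp [run]
  | cons c cs ih =>
    intro st v
    cases st with
    | nil => simpa [run] using ih [c] v
    | cons t st' =>
      by_cases h : pvCancel t c = true <;> simp [run, h] <;>
        [exact ih st' v; exact ih (c :: t :: st') v]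

theorem run_irred : ∀ (l st : List Char), Irred st → Irred (run st l) := by
  intro l
  induction l with
  | nil => intro st h; exact h
  | cons c cs ih =>
    intro st h
    cases st with
    | nil => exact ih [c] (List.isChain_singleton c)
    | cons t st' =>
      by_cases hc : pvCancel t c = true
      · simpa [run, hc] using ih st' h.tail
      · have h' : Irred (c :: t :: st') :=
          List.isChain_cons_cons.mpr ⟨by rw [pvCancel_symm]; simpa using hc, h⟩
        simpa [run, hc] using ih (c :: t :: st') h'

-- deleting one cancelable pair at the head of the input does not change the outcome
theorem run_cancel_pair {a b : Char} (hab : pvCancel a b = true) :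
    ∀ (st v : List Char), Irred st → run st (a :: b :: v) = run st v := by
  intro st v hst
  cases st with
  | nil => simp [run, hab]
  | cons t st' =>
    by_cases htc : pvCancel t a = true
    · have tb : t = b := cancel_opp htc hab
      subst tb
      simp only [run, htc, if_true]
      cases st' with
      | nil => simp [run]
      | cons u st'' =>
        have hut : pvCancel u t = false := by
          rw [pvCancel_symm]
          exact (List.isChain_cons_cons.mp hst).1
        simp [run, hut]
    · simp [run, htc, hab]

-- on an input with no adjacent cancelable pair, A's pass returns the input unchanged
theorem run_irred_input : ∀ (l st : List Char),
    List.IsChain (fun x y => pvCancel x y = false) (st.reverse ++ l) →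
    run st l = l.reverse ++ st := by
  intro l
  induction l with
  | nil => intro st _; simp [run]
  | cons c cs ih =>
    intro st h
    cases st with
    | nil =>
      have := ih [c] (by simpa using h)
      simpa [run] using this
    | cons t st' =>
      have h'' : List.IsChain (fun x y => pvCancel x y = false)
          (st'.reverse ++ t :: c :: cs) := by
        have e : (t :: st').reverse ++ c :: cs = st'.reverse ++ t :: c :: cs := by simp
        rwa [e] at h
      have htc : pvCancel t c = false := (List.isChain_append_cons_cons.mp h'').2.1
      have h3 : List.IsChain (fun x y => pvCancel x y = false)
          ((c :: t :: st').reverse ++ cs) := by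
        have e : (c :: t :: st').reverse ++ cs = st'.reverse ++ t :: c :: cs := by simp
        rw [e]; exact h''
      have := ih (c :: t :: st') h3
      simp only [run, htc]
      simp only [List.reverse_cons] at this ⊢
      rw [this]
      simp

theorem findCancel_none {s : List Char} (h : findCancel s = none) :
    List.IsChain (fun x y => pvCancel x y = false) s := by
  induction s with
  | nil => exact List.isChain_nil
  | cons a t ih =>
    match t with
    | [] => exact List.isChain_singleton a
    | b :: rest =>
      by_cases hc : pvCancel a b = true
      · simp [findCancel, hc] at h
      · simp only [findCancel, hc, if_false, Bool.false_eq_true, Option.map_eq_none_iff] at h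
        exact List.isChain_cons_cons.mpr ⟨by simpa using hc, ih h⟩

theorem findCancel_some : ∀ {s : List Char} {i : Nat}, findCancel s = some i →
    ∃ a b, pvCancel a b = true ∧ s = s.take i ++ a :: b :: s.drop (i + 2) := by
  intro s
  induction s with
  | nil => intro i h; simp [findCancel] at h
  | cons a t ih =>
    intro i h
    match t with
    | [] => simp [findCancel] at h
    | b :: rest =>
      by_cases hc : pvCancel a b = true
      · simp [findCancel, hc] at h
        subst h
        exact ⟨a, b, hc, by simp⟩
      · simp [findCancel, hc] at h
        obtain ⟨j, hj, rfl⟩ := h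
        obtain ⟨x, y, hxy, heq⟩ := ih hj
        refine ⟨x, y, hxy, ?_⟩
        calc a :: b :: rest = a :: ((b :: rest).take j ++ x :: y :: (b :: rest).drop (j + 2)) := by
              rw [← heq]
          _ = (a :: b :: rest).take (j + 1) ++ x :: y :: (a :: b :: rest).drop (j + 1 + 2) := by
              simp

theorem reduceB_eq_run : ∀ (l : List Char), reduceB l = (run [] l).reverse := by
  intro l
  induction l using reduceB.induct with
  | case1 s i h ih =>
    obtain ⟨a, b, hab, heq⟩ := findCancel_some h
    have hrun : run [] s = run [] (s.take i ++ s.drop (i + 2)) := by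
      conv_lhs => rw [heq]
      rw [run_append, run_append]
      exact run_cancel_pair hab _ _ (run_irred _ [] List.isChain_nil)
    rw [reduceB]
    split
    · rename_i i' h'
      rw [h] at h'
      injection h' with e
      subst e
      rw [ih, ← hrun]
    · rename_i h'
      rw [h] at h'
      cases h'
  | case2 s h =>
    rw [reduceB]
    split
    · rename_i i' h'
      rw [h] at h'
      cases h'
    · rw [run_irred_input s [] (by simpa using findCancel_none h)]
      simp

theorem foldl_eq_run : ∀ (l st : List Char), l.foldl cleanStep st = (run st.reverse l).reverse := by
  intro l
  induction l with
  | nil => intro st; simp [run]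
  | cons c cs ih =>
    intro st
    rcases List.eq_nil_or_concat' st with rfl | ⟨st₀, t, rfl⟩
    · simpa [cleanStep, run] using ih [c]
    · have hstep : cleanStep (st₀ ++ [t]) c =
          if pvCancel t c then st₀ else (st₀ ++ [t]) ++ [c] := by
        simp [cleanStep]
      by_cases hc : pvCancel t c = true
      · rw [List.foldl_cons, hstep, if_pos hc, ih st₀]
        simp [run, hc]
      · rw [List.foldl_cons, hstep, if_neg hc, ih ((st₀ ++ [t]) ++ [c])]
        simp [run, hc]

-- ===== VERDICT (by name: the statement is the Claim_ definition above) =====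
theorem clean_post_spec : Claim_equal_clean_post := by
  intro post _
  unfold Spec_clean_post clean_post clean_post_alt
  by_cases h : post.toList.length = 0
  · have hnil : post.toList = [] := List.length_eq_zero_iff.mp h
    rw [if_pos h, hnil]
    have hred : reduceB [] = [] := by
      rw [reduceB]
      split
      · rename_i i h'
        simp [findCancel] at h'
      · rfl
    rw [hred]
    rfl
  · rw [if_neg h, foldl_eq_run, reduceB_eq_run]
    simp
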